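-- pv_equiv track=rewrite | github.com/Sam-Tech-2543/Competitive-Programming | GeeksForGeeks/maxXP.py | MaxXP
-- ===== SOURCE A (Python) =====
-- from typing import List
--
-- def MaxXP(n : int, k : int, initial_exp : int, exp_req : List[int], exp_gain : List[int]) -> int:
--     # code here
--
--     hm=dict()
--     for i in range(n):
--         hm[i]=1
--
--
--     for j in range(k):
--         mv=0
--         iv=-1
--         for i in range(n):
--             if hm[i] and exp_req[i]<=initial_exp and mv<exp_gain[i]:
--                 mv=exp_gain[i]
--                 iv=i
--
--         if iv==-1:
--             return initial_exp
--
--         initial_exp+=mv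
--         hm[iv]=0
--
--     return initial_exp
-- ===== SOURCE B (Python) =====
-- from typing import List
--
-- def MaxXP(n : int, k : int, initial_exp : int, exp_req : List[int], exp_gain : List[int]) -> int:
--     # Incremental unlocked-pool greedy: monsters move one-way from 'rest' (locked)
--     # to 'pool' (unlocked candidates); each round picks max(pool) and deletes it,
--     # instead of rescanning every monster against a flag dict like A does.
--     rest = [(exp_req[i], exp_gain[i], i) for i in range(max(n, 0)) if exp_gain[i] > 0]
--     pool = []
--     exp = initial_exp
--     for _ in range(max(k, 0)):
--         newly = [t for t in rest if t[0] <= exp]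
--         rest = [t for t in rest if t[0] > exp]
--         pool += [(g, -i) for r, g, i in newly]
--         if not pool:
--             return exp
--         best = max(pool)
--         pool.remove(best)
--         exp += best[0]
--     return exp
-- ===== Notes on version B (the rewrite author's own statement) =====
-- stated objective: alternative
-- what changed: A keeps a 0/1 flag dict over all n indices and rescans every monster (flag + affordability + running max) on each of the k rounds; B builds the positive-gain monsters once as (req,gain,idx) triples and moves each one exactly once from a shrinking locked list into an unlocked candidate pool as exp grows, then picks max(pool) (max gain, smallest index on ties) and deletes it.
-- outside the precondition, e.g. on MaxXP(3, 0, 5, [], []): A returns 5, B raises IndexError; on MaxXP(2, 1, 0, [5, 6], []): A returns 0, B raises IndexError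
import Mathlib
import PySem

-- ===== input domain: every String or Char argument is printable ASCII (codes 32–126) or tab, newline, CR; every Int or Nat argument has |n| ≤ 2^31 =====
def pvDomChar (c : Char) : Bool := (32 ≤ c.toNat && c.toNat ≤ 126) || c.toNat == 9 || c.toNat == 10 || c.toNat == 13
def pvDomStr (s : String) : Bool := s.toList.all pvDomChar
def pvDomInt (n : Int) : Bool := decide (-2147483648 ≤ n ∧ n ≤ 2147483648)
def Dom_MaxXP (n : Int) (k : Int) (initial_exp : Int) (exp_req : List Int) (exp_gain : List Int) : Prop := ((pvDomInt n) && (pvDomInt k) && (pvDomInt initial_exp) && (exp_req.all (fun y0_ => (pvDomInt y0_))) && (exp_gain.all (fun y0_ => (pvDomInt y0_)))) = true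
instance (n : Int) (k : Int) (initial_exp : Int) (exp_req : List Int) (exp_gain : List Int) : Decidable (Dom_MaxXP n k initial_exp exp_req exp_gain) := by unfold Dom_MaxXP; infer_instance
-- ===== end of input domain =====

set_option maxHeartbeats 1000000


-- B replaces A's per-round rescan of all n monsters against a 0/1 flag dict by a one-way
-- locked-list → unlocked-pool structure with max(pool)/remove; return values proved equal on Pre_.

-- ===== PORT A =====
-- A's inner 'for i in range(n)' scan: running max mv with strict comparison (first index wins ties);
-- 'hm[i]' is truthy iff ≠ 0 (keys 0..n-1 are always present, so getD is exact);
-- exp_req[i]/exp_gain[i] are in range under Pre_, so pyGetD's default is never taken there.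
def pvScanA (n : Int) (exp_req : List Int) (exp_gain : List Int) (hm : PySem.Dict Int Int) (exp : Int) : Int × Int :=
  (PySem.List.pyRange 0 n 1).foldl (fun s i =>
    if PySem.Dict.getD hm i 0 ≠ 0 ∧ PySem.List.pyGetD exp_req i 0 ≤ exp ∧ s.1 < PySem.List.pyGetD exp_gain i 0
    then (PySem.List.pyGetD exp_gain i 0, i) else s) (0, -1)

-- A's outer 'for j in range(k)' loop (fuel = remaining rounds) with the early return on iv == -1
def pvLoopA (n : Int) (exp_req : List Int) (exp_gain : List Int) : Nat → PySem.Dict Int Int → Int → Int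
  | 0, _, exp => exp
  | j + 1, hm, exp =>
    if (pvScanA n exp_req exp_gain hm exp).2 = -1 then exp
    else pvLoopA n exp_req exp_gain j
      (PySem.Dict.insert hm (pvScanA n exp_req exp_gain hm exp).2 0)
      (exp + (pvScanA n exp_req exp_gain hm exp).1)

def MaxXP (n : Int) (k : Int) (initial_exp : Int) (exp_req : List Int) (exp_gain : List Int) : Int :=
  pvLoopA n exp_req exp_gain k.toNat
    ((PySem.List.pyRange 0 n 1).foldl (fun d i => PySem.Dict.insert d i 1) PySem.Dict.empty)
    initial_exp

-- ===== PORT B =====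
-- Source B's round loop; 'if not pool: return exp' is the none branch (max2? is none exactly on []);
-- max(pool) on int pairs is max2? keyed by the two tuple components (Python's lexicographic max);
-- pool.remove(best) is remove? (best ∈ pool, so the getD default is never taken).
def pvLoopB : Nat → List (Int × Int × Int) → List (Int × Int) → Int → Int
  | 0, _, _, exp => exp
  | j + 1, rest, pool, exp =>
    match PySem.List.max2?
        (pool ++ (rest.filter (fun t => decide (t.1 ≤ exp))).map (fun t => (t.2.1, -t.2.2)))
        (fun c => c.1) (fun c => c.2) with
    | none => exp
    | some best =>
      pvLoopB j (rest.filter (fun t => decide (exp < t.1)))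
        ((PySem.List.remove?
            (pool ++ (rest.filter (fun t => decide (t.1 ≤ exp))).map (fun t => (t.2.1, -t.2.2))) best).getD
          (pool ++ (rest.filter (fun t => decide (t.1 ≤ exp))).map (fun t => (t.2.1, -t.2.2))))
        (exp + best.1)

def MaxXP_alt (n : Int) (k : Int) (initial_exp : Int) (exp_req : List Int) (exp_gain : List Int) : Int :=
  pvLoopB k.toNat
    (((PySem.List.pyRange 0 (max n 0) 1).filter (fun i => decide (0 < PySem.List.pyGetD exp_gain i 0))).map
      (fun i => (PySem.List.pyGetD exp_req i 0, PySem.List.pyGetD exp_gain i 0, i)))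
    [] initial_exp

-- ===== PRECONDITION & SPEC =====
-- Pre_ excludes inputs where n exceeds a list's length: A indexes exp_req[i]/exp_gain[i] for i < n
-- and raises IndexError there, except in corners (k ≤ 0, or no monster is affordable before the
-- missing entries) where A returns early while B, which indexes all n entries up front, raises.
def Pre_MaxXP (n : Int) (k : Int) (initial_exp : Int) (exp_req : List Int) (exp_gain : List Int) : Prop :=
  n ≤ (exp_req.length : Int) ∧ n ≤ (exp_gain.length : Int)
instance (n : Int) (k : Int) (initial_exp : Int) (exp_req : List Int) (exp_gain : List Int) : Decidable (Pre_MaxXP n k initial_exp exp_req exp_gain) := by unfold Pre_MaxXP; infer_instance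

def pvWitness_MaxXP : Int × Int × Int × List Int × List Int := (2, 2, 10, [5, 20], [3, 4])

def Spec_MaxXP (n : Int) (k : Int) (initial_exp : Int) (exp_req : List Int) (exp_gain : List Int) (out : Int) : Prop := out = MaxXP_alt n k initial_exp exp_req exp_gain
instance (n : Int) (k : Int) (initial_exp : Int) (exp_req : List Int) (exp_gain : List Int) (out : Int) : Decidable (Spec_MaxXP n k initial_exp exp_req exp_gain out) := by unfold Spec_MaxXP; infer_instance

-- ===== CLAIM (what is proved, stated in full; the proofs are below) =====
def Claim_equal_MaxXP : Prop := ∀ (n : Int) (k : Int) (initial_exp : Int) (exp_req : List Int) (exp_gain : List Int), Dom_MaxXP n k initial_exp exp_req exp_gain → Pre_MaxXP n k initial_exp exp_req exp_gain → Spec_MaxXP n k initial_exp exp_req exp_gain (MaxXP n k initial_exp exp_req exp_gain)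

-- ===== LEMMAS AND PROOFS =====

-- the triple list [(exp_req[i], exp_gain[i], i) for i in range(n)]
def pvT (exp_req exp_gain : List Int) (n : Int) : List (Int × Int × Int) :=
  (PySem.List.pyRange 0 n 1).map (fun i => (PySem.List.pyGetD exp_req i 0, PySem.List.pyGetD exp_gain i 0, i))

def pvCand (t : Int × Int × Int) : Int × Int := (t.2.1, -t.2.2)

def pvPos (t : Int × Int × Int) : Bool := decide (0 < t.2.1)
def pvLe (exp : Int) (t : Int × Int × Int) : Bool := decide (t.1 ≤ exp)
def pvGt (exp : Int) (t : Int × Int × Int) : Bool := decide (exp < t.1)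

def pvStep (exp : Int) (H : Int → Bool) (s : Int × Int) (t : Int × Int × Int) : Int × Int :=
  if H t.2.2 = true ∧ t.1 ≤ exp ∧ s.1 < t.2.1 then (t.2.1, t.2.2) else s

def pvHm (hm : PySem.Dict Int Int) : Int → Bool := fun i => decide (PySem.Dict.getD hm i 0 ≠ 0)

def pvHP (hm : PySem.Dict Int Int) (t : Int × Int × Int) : Bool := pvHm hm t.2.2 && pvPos t

def pvLexLE (c d : Int × Int) : Prop := c.1 < d.1 ∨ (c.1 = d.1 ∧ c.2 ≤ d.2)

lemma pvLexLE_refl (a : Int × Int) : pvLexLE a a := Or.inr ⟨rfl, le_refl _⟩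

lemma pvLexLE_trans {a b c : Int × Int} (h1 : pvLexLE a b) (h2 : pvLexLE b c) : pvLexLE a c := by
  unfold pvLexLE at *; omega

lemma pvLexLE_antisymm {a b : Int × Int} (h1 : pvLexLE a b) (h2 : pvLexLE b a) : a = b := by
  obtain ⟨a1, a2⟩ := a; obtain ⟨b1, b2⟩ := b
  unfold pvLexLE at h1 h2
  simp only [Prod.mk.injEq]
  constructor <;> omega

lemma pvT_mem_iff (exp_req exp_gain : List Int) (n : Int) (t : Int × Int × Int) :
    t ∈ pvT exp_req exp_gain n ↔
      t.2.2 ∈ PySem.List.pyRange 0 n 1 ∧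
      t = (PySem.List.pyGetD exp_req t.2.2 0, PySem.List.pyGetD exp_gain t.2.2 0, t.2.2) := by
  constructor
  · intro h
    rcases List.mem_map.1 h with ⟨i, hi, rfl⟩
    exact ⟨hi, rfl⟩
  · rintro ⟨hi, ht⟩
    rw [ht]; exact List.mem_map.2 ⟨t.2.2, hi, rfl⟩

lemma pvT_idx_nonneg {exp_req exp_gain : List Int} {n : Int} {t : Int × Int × Int}
    (ht : t ∈ pvT exp_req exp_gain n) : 0 ≤ t.2.2 := by
  have := ((pvT_mem_iff exp_req exp_gain n t).1 ht).1
  exact (PySem.List.mem_pyRange_one.1 this).1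

lemma pvT_inj {exp_req exp_gain : List Int} {n : Int} {t u : Int × Int × Int}
    (ht : t ∈ pvT exp_req exp_gain n) (hu : u ∈ pvT exp_req exp_gain n) (h : t.2.2 = u.2.2) : t = u := by
  rw [((pvT_mem_iff exp_req exp_gain n t).1 ht).2, ((pvT_mem_iff exp_req exp_gain n u).1 hu).2, h]

lemma pvT_pairwise (exp_req exp_gain : List Int) (n : Int) :
    (pvT exp_req exp_gain n).Pairwise (fun a b => a.2.2 < b.2.2) := by
  unfold pvT
  refine List.Pairwise.map _ (fun a b h => ?_) (PySem.List.pairwise_lt_pyRange_one 0 n)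
  simpa using h

lemma pvT_nodup (exp_req exp_gain : List Int) (n : Int) : (pvT exp_req exp_gain n).Nodup := by
  have h := pvT_pairwise exp_req exp_gain n
  exact h.imp (fun {a b} hlt => by intro he; rw [he] at hlt; omega)

lemma pvScanA_eq (n : Int) (exp_req exp_gain : List Int) (hm : PySem.Dict Int Int) (exp : Int) :
    pvScanA n exp_req exp_gain hm exp
      = (pvT exp_req exp_gain n).foldl (pvStep exp (pvHm hm)) (0, -1) := by
  unfold pvScanA pvT
  rw [List.foldl_map]
  refine PySem.List.foldl_congr_mem _ _ _ _ ?_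
  intro s i _
  simp [pvStep, pvHm]

lemma pvHm_insert0 (hm : PySem.Dict Int Int) (i0 i : Int) :
    pvHm (PySem.Dict.insert hm i0 0) i = if i = i0 then false else pvHm hm i := by
  by_cases h : i = i0
  · subst h; simp [pvHm, PySem.Dict.getD_insert_self]
  · simp [pvHm, h, PySem.Dict.getD_insert_of_ne hm 0 0 h]

lemma pvDict_init (l : List Int) : ∀ (d : PySem.Dict Int Int) (i : Int),
    PySem.Dict.getD (l.foldl (fun d j => PySem.Dict.insert d j 1) d) i 0
      = if i ∈ l then 1 else PySem.Dict.getD d i 0 := by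
  induction l with
  | nil => intro d i; simp
  | cons j tl ih =>
    intro d i
    simp only [List.foldl_cons, ih, List.mem_cons]
    by_cases h : i ∈ tl
    · simp [h]
    · by_cases hj : i = j
      · subst hj; simp [h, PySem.Dict.getD_insert_self]
      · simp [h, hj, PySem.Dict.getD_insert_of_ne d 1 0 hj]

lemma pvFilter_singleton {α : Type} [DecidableEq α] (l : List α) (p : α → Bool) (a : α)
    (hn : l.Nodup) (ha : a ∈ l) (hp : ∀ x ∈ l, p x = true ↔ x = a) :
    l.filter p = [a] := by
  induction l with
  | nil => cases ha
  | cons x tl ih =>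
    rcases List.mem_cons.1 ha with heq | hmem
    · subst heq
      have hx : p a = true := (hp a (by simp)).2 rfl
      have htl : tl.filter p = [] := by
        rw [List.filter_eq_nil_iff]
        intro b hb hpb
        have hb2 : b = a := (hp b (List.mem_cons_of_mem _ hb)).1 hpb
        subst hb2
        exact (List.nodup_cons.1 hn).1 hb
      simp [List.filter_cons, hx, htl]
    · have hx : ¬ (p x = true) := by
        intro hx
        have hxa := (hp x (by simp)).1 hx
        subst hxa
        exact (List.nodup_cons.1 hn).1 hmem
      rw [List.filter_cons_of_neg (by simpa using hx)]
      exact ih (List.nodup_cons.1 hn).2 hmem (fun b hb => hp b (List.mem_cons_of_mem _ hb))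

lemma pvScan_go (exp : Int) (H : Int → Bool) :
    ∀ (L : List (Int × Int × Int)) (s : Int × Int),
      0 ≤ s.1 →
      (∀ t ∈ L, s.2 < t.2.2) →
      L.Pairwise (fun a b => a.2.2 < b.2.2) →
      s.1 ≤ (L.foldl (pvStep exp H) s).1 ∧
      ((L.foldl (pvStep exp H) s) = s ∨
        ∃ t ∈ L, (H t.2.2 = true ∧ t.1 ≤ exp ∧ s.1 < t.2.1) ∧ (L.foldl (pvStep exp H) s) = (t.2.1, t.2.2)) ∧
      (∀ t ∈ L, H t.2.2 = true → t.1 ≤ exp → 0 < t.2.1 →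
        pvLexLE (t.2.1, -t.2.2) ((L.foldl (pvStep exp H) s).1, -(L.foldl (pvStep exp H) s).2)) := by
  intro L
  induction L with
  | nil =>
    intro s h0 _ _
    refine ⟨le_refl _, Or.inl rfl, ?_⟩
    intro t ht; cases ht
  | cons t0 tl ih =>
    intro s h0 hidx hpw
    have hhead := (List.pairwise_cons.1 hpw).1
    have hpw' := (List.pairwise_cons.1 hpw).2
    simp only [List.foldl_cons]
    by_cases hc : H t0.2.2 = true ∧ t0.1 ≤ exp ∧ s.1 < t0.2.1
    · have hstep : pvStep exp H s t0 = (t0.2.1, t0.2.2) := by simp [pvStep, hc]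
      rw [hstep]
      obtain ⟨c1, c2, c3⟩ := ih (t0.2.1, t0.2.2) (by have := hc.2.2; simp only; omega)
        (fun t ht => hhead t ht) hpw'
      refine ⟨?_, ?_, ?_⟩
      · have h1 := hc.2.2
        simp only at c1 ⊢
        omega
      · rcases c2 with heq | ⟨u, hu, hPu, hru⟩
        · exact Or.inr ⟨t0, by simp, hc, heq⟩
        · refine Or.inr ⟨u, List.mem_cons_of_mem _ hu, ⟨hPu.1, hPu.2.1, ?_⟩, hru⟩
          have h1 := hc.2.2
          have h2 := hPu.2.2
          simp only at h2
          omega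
      · intro t ht hH hle hpos
        rcases List.mem_cons.1 ht with rfl | htl
        · rcases c2 with heq | ⟨u, hu, hPu, hru⟩
          · rw [heq]; exact pvLexLE_refl _
          · have h2 := hPu.2.2
            rw [hru]
            exact Or.inl (by simp only at h2 ⊢; omega)
        · exact c3 t htl hH hle hpos
    · have hstep : pvStep exp H s t0 = s := by simp only [pvStep, if_neg hc]
      rw [hstep]
      obtain ⟨c1, c2, c3⟩ := ih s h0 (fun t ht => hidx t (List.mem_cons_of_mem _ ht)) hpw'
      refine ⟨c1, ?_, ?_⟩
      · rcases c2 with heq | ⟨u, hu, hPu, hru⟩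
        · exact Or.inl heq
        · exact Or.inr ⟨u, List.mem_cons_of_mem _ hu, hPu, hru⟩
      · intro t ht hH hle hpos
        rcases List.mem_cons.1 ht with rfl | htl
        · have hg : t.2.1 ≤ s.1 := by
            by_contra hgt
            exact hc ⟨hH, hle, by omega⟩
          have hs2 : s.2 < t.2.2 := hidx t (by simp)
          rcases c2 with heq | ⟨u, hu, hPu, hru⟩
          · rw [heq]
            unfold pvLexLE
            simp only
            omega
          · have h2 := hPu.2.2
            rw [hru]
            unfold pvLexLE
            simp only at h2 ⊢
            omega
        · exact c3 t htl hH hle hpos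

def pvM2Step (acc : Option (Int × Int)) (x : Int × Int) : Option (Int × Int) :=
  match acc with
  | none => some x
  | some m => if (decide (m.1 < x.1) || (!decide (x.1 < m.1) && decide (m.2 < x.2))) = true
              then some x else some m

lemma pvMax2_eq (l : List (Int × Int)) :
    PySem.List.max2? l (fun c => c.1) (fun c => c.2) = l.foldl pvM2Step none := by
  unfold PySem.List.max2?
  exact PySem.List.foldl_congr_mem _ _ _ _ (by intro acc x _; cases acc <;> rfl)

lemma pvMax2_go : ∀ (l : List (Int × Int)) (m0 : Int × Int),
    ∃ m, l.foldl pvM2Step (some m0) = some m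
      ∧ (m = m0 ∨ m ∈ l) ∧ pvLexLE m0 m ∧ ∀ y ∈ l, pvLexLE y m := by
  intro l
  induction l with
  | nil =>
    intro m0
    exact ⟨m0, rfl, Or.inl rfl, pvLexLE_refl _, by intro y hy; cases hy⟩
  | cons x tl ih =>
    intro m0
    by_cases h : (decide (m0.1 < x.1) || (!decide (x.1 < m0.1) && decide (m0.2 < x.2))) = true
    · obtain ⟨m, hm, hmem, hle, hub⟩ := ih x
      have hstep : pvM2Step (some m0) x = some x := by simp [pvM2Step, h]
      have hm0x : pvLexLE m0 x := by
        unfold pvLexLE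
        simp only [Bool.or_eq_true, Bool.and_eq_true, Bool.not_eq_true', decide_eq_true_eq,
          decide_eq_false_iff_not] at h
        omega
      refine ⟨m, ?_, ?_, pvLexLE_trans hm0x hle, ?_⟩
      · rw [List.foldl_cons, hstep]; exact hm
      · rcases hmem with rfl | hmem
        · exact Or.inr (by simp)
        · exact Or.inr (List.mem_cons_of_mem _ hmem)
      · intro y hy
        rcases List.mem_cons.1 hy with rfl | hy
        · exact hle
        · exact hub y hy
    · obtain ⟨m, hm, hmem, hle, hub⟩ := ih m0
      have hstep : pvM2Step (some m0) x = some m0 := by simp only [pvM2Step, if_neg h]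
      have hxm0 : pvLexLE x m0 := by
        unfold pvLexLE
        simp only [Bool.or_eq_true, Bool.and_eq_true, Bool.not_eq_true', decide_eq_true_eq,
          decide_eq_false_iff_not] at h
        omega
      refine ⟨m, ?_, ?_, hle, ?_⟩
      · rw [List.foldl_cons, hstep]; exact hm
      · rcases hmem with rfl | hmem
        · exact Or.inl rfl
        · exact Or.inr (List.mem_cons_of_mem _ hmem)
      · intro y hy
        rcases List.mem_cons.1 hy with rfl | hy
        · exact pvLexLE_trans hxm0 hle
        · exact hub y hy

lemma pvMax2_none {l : List (Int × Int)}
    (h : PySem.List.max2? l (fun c => c.1) (fun c => c.2) = none) : l = [] := by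
  cases l with
  | nil => rfl
  | cons x tl =>
    rw [pvMax2_eq, List.foldl_cons, show pvM2Step none x = some x from rfl] at h
    obtain ⟨m, hm, -, -, -⟩ := pvMax2_go tl x
    rw [hm] at h
    cases h

lemma pvMax2_some {l : List (Int × Int)} {m : Int × Int}
    (h : PySem.List.max2? l (fun c => c.1) (fun c => c.2) = some m) :
    m ∈ l ∧ ∀ y ∈ l, pvLexLE y m := by
  cases l with
  | nil => rw [pvMax2_eq] at h; cases h
  | cons x tl =>
    rw [pvMax2_eq, List.foldl_cons, show pvM2Step none x = some x from rfl] at h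
    obtain ⟨m', hm', hmem, hle, hub⟩ := pvMax2_go tl x
    rw [hm'] at h
    cases h
    constructor
    · rcases hmem with rfl | hmem
      · simp
      · exact List.mem_cons_of_mem _ hmem
    · intro y hy
      rcases List.mem_cons.1 hy with rfl | hy
      · exact hle
      · exact hub y hy

lemma pvLoopB_succ_none {j : Nat} {rest : List (Int × Int × Int)} {pool : List (Int × Int)} {exp : Int}
    (h : PySem.List.max2?
        (pool ++ (rest.filter (fun t => decide (t.1 ≤ exp))).map (fun t => (t.2.1, -t.2.2)))
        (fun c => c.1) (fun c => c.2) = none) :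
    pvLoopB (j + 1) rest pool exp = exp := by
  simp only [pvLoopB]
  rw [h]

lemma pvLoopB_succ_some {j : Nat} {rest : List (Int × Int × Int)} {pool : List (Int × Int)} {exp : Int}
    {best : Int × Int}
    (h : PySem.List.max2?
        (pool ++ (rest.filter (fun t => decide (t.1 ≤ exp))).map (fun t => (t.2.1, -t.2.2)))
        (fun c => c.1) (fun c => c.2) = some best) :
    pvLoopB (j + 1) rest pool exp
      = pvLoopB j (rest.filter (fun t => decide (exp < t.1)))
          ((PySem.List.remove?
              (pool ++ (rest.filter (fun t => decide (t.1 ≤ exp))).map (fun t => (t.2.1, -t.2.2))) best).getD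
            (pool ++ (rest.filter (fun t => decide (t.1 ≤ exp))).map (fun t => (t.2.1, -t.2.2))))
          (exp + best.1) := by
  simp only [pvLoopB]
  rw [h]

lemma pv_main (exp_req exp_gain : List Int) (n : Int) :
    ∀ (j : Nat) (hm : PySem.Dict Int Int) (rest : List (Int × Int × Int)) (pool : List (Int × Int)) (exp : Int),
      rest.Sublist ((pvT exp_req exp_gain n).filter pvPos) →
      (∀ t ∈ rest, pvHm hm t.2.2 = true) →
      (∀ t ∈ pvT exp_req exp_gain n, pvHm hm t.2.2 = true → 0 < t.2.1 → exp < t.1 → t ∈ rest) →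
      ((↑pool : Multiset (Int × Int)) + ↑(rest.map pvCand)
        = ↑(((pvT exp_req exp_gain n).filter (pvHP hm)).map pvCand)) →
      pvLoopA n exp_req exp_gain j hm exp = pvLoopB j rest pool exp := by
  intro j
  induction j with
  | zero => intro hm rest pool exp _ _ _ _; rfl
  | succ j ih =>
    intro hm rest pool exp h1 h2 h3 h4
    have hTLnd := pvT_nodup exp_req exp_gain n
    have hTLpw := pvT_pairwise exp_req exp_gain n
    have coeadd : ∀ (l1 l2 : List (Int × Int)), (↑(l1 ++ l2) : Multiset (Int × Int)) = ↑l1 + ↑l2 :=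
      fun _ _ => rfl
    have hrestT : ∀ t ∈ rest, t ∈ pvT exp_req exp_gain n ∧ 0 < t.2.1 := by
      intro t ht
      have hmem := h1.subset ht
      rw [List.mem_filter] at hmem
      exact ⟨hmem.1, by have := hmem.2; simpa [pvPos] using this⟩
    have hrestnd : rest.Nodup := h1.nodup (List.filter_sublist.nodup hTLnd)
    have hgt_perm : (rest.filter (pvGt exp)).Perm
        (((pvT exp_req exp_gain n).filter (pvHP hm)).filter (pvGt exp)) := by
      rw [List.perm_ext_iff_of_nodup (List.filter_sublist.nodup hrestnd)
        (List.filter_sublist.nodup (List.filter_sublist.nodup hTLnd))]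
      intro a
      simp only [List.mem_filter, pvHP, pvGt, pvPos, Bool.and_eq_true, decide_eq_true_eq]
      constructor
      · rintro ⟨ha, hgt⟩
        obtain ⟨haT, hapos⟩ := hrestT a ha
        exact ⟨⟨haT, h2 a ha, by simpa using hapos⟩, hgt⟩
      · rintro ⟨⟨haT, hH, hpos⟩, hgt⟩
        exact ⟨h3 a haT hH (by simpa using hpos) hgt, hgt⟩
    have hsplitR : (↑(rest.map pvCand) : Multiset (Int × Int))
        = ↑((rest.filter (pvLe exp)).map pvCand) + ↑((rest.filter (pvGt exp)).map pvCand) := by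
      have hperm : (rest.filter (pvLe exp) ++ rest.filter (pvGt exp)).Perm rest := by
        have hx := List.filter_append_perm (pvLe exp) rest
        have hcg : rest.filter (fun t => !(pvLe exp t)) = rest.filter (pvGt exp) :=
          List.filter_congr (by
            intro t _
            by_cases hh : t.1 ≤ exp <;> simp [pvLe, pvGt, hh] <;> omega)
        rwa [hcg] at hx
      have hmm := (hperm.map pvCand).symm
      rw [← Multiset.coe_eq_coe] at hmm
      rw [hmm, List.map_append, coeadd]
    have hsplitT : (↑(((pvT exp_req exp_gain n).filter (pvHP hm)).map pvCand) : Multiset (Int × Int))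
        = ↑((((pvT exp_req exp_gain n).filter (pvHP hm)).filter (pvLe exp)).map pvCand)
          + ↑((((pvT exp_req exp_gain n).filter (pvHP hm)).filter (pvGt exp)).map pvCand) := by
      have hperm : (((pvT exp_req exp_gain n).filter (pvHP hm)).filter (pvLe exp)
          ++ ((pvT exp_req exp_gain n).filter (pvHP hm)).filter (pvGt exp)).Perm
            ((pvT exp_req exp_gain n).filter (pvHP hm)) := by
        have hx := List.filter_append_perm (pvLe exp) ((pvT exp_req exp_gain n).filter (pvHP hm))
        have hcg : ((pvT exp_req exp_gain n).filter (pvHP hm)).filter (fun t => !(pvLe exp t))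
            = ((pvT exp_req exp_gain n).filter (pvHP hm)).filter (pvGt exp) :=
          List.filter_congr (by
            intro t _
            by_cases hh : t.1 ≤ exp <;> simp [pvLe, pvGt, hh] <;> omega)
        rwa [hcg] at hx
      have hmm := (hperm.map pvCand).symm
      rw [← Multiset.coe_eq_coe] at hmm
      rw [hmm, List.map_append, coeadd]
    have hgt_eq : (↑((rest.filter (pvGt exp)).map pvCand) : Multiset (Int × Int))
        = ↑((((pvT exp_req exp_gain n).filter (pvHP hm)).filter (pvGt exp)).map pvCand) :=
      Multiset.coe_eq_coe.2 (hgt_perm.map pvCand)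
    have hC : (↑(pool ++ (rest.filter (pvLe exp)).map pvCand) : Multiset (Int × Int))
        = ↑((((pvT exp_req exp_gain n).filter (pvHP hm)).filter (pvLe exp)).map pvCand) := by
      have h4' := h4
      rw [hsplitR, hsplitT, hgt_eq, ← add_assoc] at h4'
      have hcc := add_right_cancel h4'
      rw [coeadd, hcc]
    have hscanidx : ∀ t ∈ pvT exp_req exp_gain n, ((0 : Int), (-1 : Int)).2 < t.2.2 := by
      intro t ht
      have := pvT_idx_nonneg ht
      simp only
      omega
    cases hmax : PySem.List.max2?
        (pool ++ (rest.filter (fun t => decide (t.1 ≤ exp))).map (fun t => (t.2.1, -t.2.2)))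
        (fun c => c.1) (fun c => c.2) with
    | none =>
      have hnil : pool ++ (rest.filter (pvLe exp)).map pvCand = [] := pvMax2_none hmax
      have hCz : (↑((((pvT exp_req exp_gain n).filter (pvHP hm)).filter (pvLe exp)).map pvCand)
          : Multiset (Int × Int)) = 0 := by
        rw [← hC, hnil]
        rfl
      have hCnil : (((pvT exp_req exp_gain n).filter (pvHP hm)).filter (pvLe exp)).map pvCand = [] :=
        (Multiset.coe_eq_zero _).1 hCz
      have hnocand : ∀ t ∈ pvT exp_req exp_gain n,
          ¬(pvHm hm t.2.2 = true ∧ t.1 ≤ exp ∧ (0 : Int) < t.2.1) := by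
        intro t htT hcontra
        have htf : t ∈ (((pvT exp_req exp_gain n).filter (pvHP hm)).filter (pvLe exp)) := by
          simp only [List.mem_filter, pvHP, pvPos, pvLe, Bool.and_eq_true, decide_eq_true_eq]
          exact ⟨⟨htT, hcontra.1, by simpa using hcontra.2.2⟩, hcontra.2.1⟩
        have hmm : pvCand t ∈ (((pvT exp_req exp_gain n).filter (pvHP hm)).filter (pvLe exp)).map pvCand :=
          List.mem_map.2 ⟨t, htf, rfl⟩
        rw [hCnil] at hmm
        cases hmm
      obtain ⟨c1, c2, c3⟩ := pvScan_go exp (pvHm hm) (pvT exp_req exp_gain n) (0, -1)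
        (by norm_num) hscanidx hTLpw
      have hrz : (pvT exp_req exp_gain n).foldl (pvStep exp (pvHm hm)) (0, -1) = (0, -1) := by
        rcases c2 with heq | ⟨u, hu, hPu, hru⟩
        · exact heq
        · exact absurd ⟨hPu.1, hPu.2.1, by have := hPu.2.2; simpa using this⟩ (hnocand u hu)
      have hA : pvScanA n exp_req exp_gain hm exp = (0, -1) := by
        rw [pvScanA_eq]; exact hrz
      rw [pvLoopB_succ_none hmax]
      simp [pvLoopA, hA]
    | some best =>
      have hmax' : PySem.List.max2? (pool ++ (rest.filter (pvLe exp)).map pvCand)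
          (fun c => c.1) (fun c => c.2) = some best := hmax
      obtain ⟨hbmem, hbub⟩ := pvMax2_some hmax'
      have hCperm : (pool ++ (rest.filter (pvLe exp)).map pvCand).Perm
          ((((pvT exp_req exp_gain n).filter (pvHP hm)).filter (pvLe exp)).map pvCand) :=
        Multiset.coe_eq_coe.1 hC
      have hbC : best ∈ (((pvT exp_req exp_gain n).filter (pvHP hm)).filter (pvLe exp)).map pvCand :=
        hCperm.mem_iff.1 hbmem
      obtain ⟨tstar, htstar, hts_eq⟩ := List.mem_map.1 hbC
      have htsT : tstar ∈ pvT exp_req exp_gain n := by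
        have hh := htstar; simp only [List.mem_filter] at hh; exact hh.1.1
      have htsH : pvHm hm tstar.2.2 = true := by
        have hh := htstar
        simp only [List.mem_filter, pvHP, Bool.and_eq_true] at hh
        exact hh.1.2.1
      have htsPos : (0 : Int) < tstar.2.1 := by
        have hh := htstar
        simp only [List.mem_filter, pvHP, pvPos, Bool.and_eq_true, decide_eq_true_eq] at hh
        exact hh.1.2.2
      have htsLe : tstar.1 ≤ exp := by
        have hh := htstar
        simp only [List.mem_filter, pvLe, decide_eq_true_eq] at hh
        exact hh.2
      obtain ⟨c1, c2, c3⟩ := pvScan_go exp (pvHm hm) (pvT exp_req exp_gain n) (0, -1)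
        (by norm_num) hscanidx hTLpw
      have hbound := c3 tstar htsT htsH htsLe htsPos
      rcases c2 with heq | ⟨u, huT, hPu, hru⟩
      · exfalso
        rw [heq] at hbound
        unfold pvLexLE at hbound
        simp only at hbound
        omega
      · have hu0 : (0 : Int) ≤ u.2.2 := pvT_idx_nonneg huT
        have huH := hPu.1
        have huLe := hPu.2.1
        have huPos : (0 : Int) < u.2.1 := by have := hPu.2.2; simpa using this
        have humem : u ∈ ((pvT exp_req exp_gain n).filter (pvHP hm)).filter (pvLe exp) := by
          simp only [List.mem_filter, pvHP, pvPos, pvLe, Bool.and_eq_true, decide_eq_true_eq]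
          exact ⟨⟨huT, huH, by simpa using huPos⟩, huLe⟩
        have huC : pvCand u ∈ pool ++ (rest.filter (pvLe exp)).map pvCand :=
          hCperm.mem_iff.2 (List.mem_map.2 ⟨u, humem, rfl⟩)
        have hub_u : pvLexLE (pvCand u) best := hbub _ huC
        have hlow : pvLexLE best (pvCand u) := by
          rw [← hts_eq]
          have h5 := hbound
          rw [hru] at h5
          simpa [pvCand] using h5
        have hbu : pvCand u = best := pvLexLE_antisymm hub_u hlow
        have hb1 : best.1 = u.2.1 := by rw [← hbu]; rfl
        have hA : pvScanA n exp_req exp_gain hm exp = (u.2.1, u.2.2) := by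
          rw [pvScanA_eq]; exact hru
        -- the singleton split of the available positive monsters at u
        have hsingle : ((pvT exp_req exp_gain n).filter (pvHP hm)).filter
            (fun t => decide (t.2.2 = u.2.2)) = [u] := by
          apply pvFilter_singleton _ _ u (List.filter_sublist.nodup hTLnd)
          · simp only [List.mem_filter, pvHP, pvPos, Bool.and_eq_true, decide_eq_true_eq]
            exact ⟨huT, huH, by simpa using huPos⟩
          · intro x hx
            simp only [List.mem_filter] at hx
            simp only [decide_eq_true_eq]
            exact ⟨fun he => pvT_inj hx.1 huT he, fun he => by rw [he]⟩
        have hHP' : (pvT exp_req exp_gain n).filter (pvHP (PySem.Dict.insert hm u.2.2 0))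
            = ((pvT exp_req exp_gain n).filter (pvHP hm)).filter (fun t => !decide (t.2.2 = u.2.2)) := by
          rw [List.filter_filter]
          apply List.filter_congr
          intro t _
          simp only [pvHP, pvHm_insert0]
          by_cases hte : t.2.2 = u.2.2
          · simp [hte]
          · simp [hte]
        have hsplitU : (↑(((pvT exp_req exp_gain n).filter (pvHP hm)).map pvCand) : Multiset (Int × Int))
            = best ::ₘ ↑(((pvT exp_req exp_gain n).filter (pvHP (PySem.Dict.insert hm u.2.2 0))).map pvCand) := by
          rw [hHP']
          have hperm := List.filter_append_perm (fun t => decide (t.2.2 = u.2.2))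
            ((pvT exp_req exp_gain n).filter (pvHP hm))
          rw [hsingle] at hperm
          have hmm := (hperm.map pvCand).symm
          rw [← Multiset.coe_eq_coe] at hmm
          rw [hmm, List.map_append, coeadd]
          simp only [List.map_cons, List.map_nil]
          rw [hbu]
          rw [Multiset.coe_singleton, Multiset.singleton_add]
        have hbestM : best ∈ (↑(pool ++ (rest.filter (pvLe exp)).map pvCand) : Multiset (Int × Int)) :=
          Multiset.mem_coe.2 hbmem
        have hrm : PySem.List.remove?
            (pool ++ (rest.filter (fun t => decide (t.1 ≤ exp))).map (fun t => (t.2.1, -t.2.2))) best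
            = some ((pool ++ (rest.filter (pvLe exp)).map pvCand).erase best) :=
          PySem.List.remove?_eq_some_erase _ best hbmem
        -- the recursive step
        have hmain : pvLoopA n exp_req exp_gain j (PySem.Dict.insert hm u.2.2 0) (exp + u.2.1)
            = pvLoopB j (rest.filter (pvGt exp))
                ((pool ++ (rest.filter (pvLe exp)).map pvCand).erase best) (exp + u.2.1) := by
          apply ih
          · exact List.Sublist.trans List.filter_sublist h1
          · intro t ht
            have htr : t ∈ rest := List.mem_of_mem_filter ht
            have hgt : exp < t.1 := by
              have := List.of_mem_filter ht
              simpa [pvGt] using this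
            have hne : t.2.2 ≠ u.2.2 := by
              intro hteq
              have hte2 : t = u := pvT_inj (hrestT t htr).1 huT hteq
              rw [hte2] at hgt
              omega
            rw [pvHm_insert0, if_neg hne]
            exact h2 t htr
          · intro t htT htH htpos hgt'
            have htH' : pvHm hm t.2.2 = true ∧ t.2.2 ≠ u.2.2 := by
              rw [pvHm_insert0] at htH
              by_cases hte : t.2.2 = u.2.2
              · rw [if_pos hte] at htH; cases htH
              · rw [if_neg hte] at htH; exact ⟨htH, hte⟩
            have hgt : exp < t.1 := by omega
            have htr := h3 t htT htH'.1 htpos hgt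
            refine List.mem_filter.2 ⟨htr, ?_⟩
            simp only [pvGt, decide_eq_true_eq]
            omega
          · have hkey : best ::ₘ ((↑((pool ++ (rest.filter (pvLe exp)).map pvCand).erase best)
                : Multiset (Int × Int)) + ↑((rest.filter (pvGt exp)).map pvCand))
                = best ::ₘ ↑(((pvT exp_req exp_gain n).filter
                    (pvHP (PySem.Dict.insert hm u.2.2 0))).map pvCand) := by
              have hpe : (pool ++ List.map pvCand (List.filter (pvLe exp) rest)).Perm
                  (best :: (pool ++ List.map pvCand (List.filter (pvLe exp) rest)).erase best) :=
                List.perm_cons_erase hbmem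
              have hpc : (↑(pool ++ List.map pvCand (List.filter (pvLe exp) rest)) : Multiset (Int × Int))
                  = best ::ₘ ↑((pool ++ List.map pvCand (List.filter (pvLe exp) rest)).erase best) :=
                Multiset.coe_eq_coe.2 hpe
              rw [← Multiset.cons_add, ← hpc, hC, hgt_eq, ← hsplitT, hsplitU]
            exact (Multiset.cons_inj_right best).1 hkey
        rw [pvLoopB_succ_some hmax, hrm, Option.getD_some, hb1]
        simp only [pvLoopA, hA]
        rw [if_neg (show ¬((u.2.1, u.2.2).2 = -1) from by simp only; omega)]
        exact hmain

-- ===== VERDICT (by name: the statement is the Claim_ definition above) =====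
theorem MaxXP_spec : Claim_equal_MaxXP := by
  intro n k initial_exp exp_req exp_gain _ _
  unfold Spec_MaxXP MaxXP MaxXP_alt
  have hrange : PySem.List.pyRange 0 (max n 0) 1 = PySem.List.pyRange 0 n 1 := by
    rcases le_total n 0 with h | h
    · rw [max_eq_right h, PySem.List.pyRange_one_eq_nil le_rfl, PySem.List.pyRange_one_eq_nil h]
    · rw [max_eq_left h]
  have hrest0 : (((PySem.List.pyRange 0 (max n 0) 1).filter
        (fun i => decide (0 < PySem.List.pyGetD exp_gain i 0))).map
      (fun i => (PySem.List.pyGetD exp_req i 0, PySem.List.pyGetD exp_gain i 0, i)))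
      = (pvT exp_req exp_gain n).filter pvPos := by
    rw [hrange]
    unfold pvT
    rw [List.filter_map]
    rfl
  rw [hrest0]
  have hH0 : ∀ t ∈ pvT exp_req exp_gain n,
      pvHm ((PySem.List.pyRange 0 n 1).foldl (fun d i => PySem.Dict.insert d i 1) PySem.Dict.empty) t.2.2
        = true := by
    intro t ht
    have hidx := ((pvT_mem_iff exp_req exp_gain n t).1 ht).1
    simp only [pvHm]
    rw [pvDict_init, if_pos hidx]
    simp
  apply pv_main
  · exact List.Sublist.refl _
  · intro t ht
    exact hH0 t (List.mem_of_mem_filter ht)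
  · intro t htT htH htpos _
    exact List.mem_filter.2 ⟨htT, by simpa [pvPos] using htpos⟩
  · have hfe : (pvT exp_req exp_gain n).filter pvPos
        = (pvT exp_req exp_gain n).filter
            (pvHP ((PySem.List.pyRange 0 n 1).foldl (fun d i => PySem.Dict.insert d i 1) PySem.Dict.empty)) := by
      apply List.filter_congr
      intro t ht
      simp only [pvHP, hH0 t ht, Bool.true_and]
    rw [← hfe]
    exact zero_add _
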